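-- pv_equiv track=rewrite | github.com/doradorn82/sf56g_evb | SF56G_EVB/evb_pmad.py | GetEye_Width
-- ===== SOURCE A (Python) =====
-- def GetEye_Width(width_data, thld=0):
--     if width_data[0] <= thld:
--         state = 'PREV_EYE'
--     else:
--         state = 'WALL'
--     ptr_beg, ptr_end = 0, 0
--     for i, data in enumerate(width_data):
--         if state == 'PREV_EYE':
--             if data > thld:
--                 state = 'WALL'
--         elif state == 'WALL':
--             if data <= thld:
--                 state = 'CURR_EYE'
--                 ptr_beg = i
--         elif state == 'CURR_EYE':
--             if data > thld:
--                 state = 'END'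
--                 ptr_end = i
--     return max(0, (ptr_end - ptr_beg))
-- ===== SOURCE B (Python) =====
-- def GetEye_Width(width_data, thld=0):
--     walls = [d > thld for d in width_data]
--     try:
--         w = 0 if walls[0] else walls.index(True)
--         beg = walls.index(False, w)
--         end = walls.index(True, beg)
--         return end - beg
--     except ValueError:
--         return 0
-- ===== Notes on version B (the rewrite author's own statement) =====
-- stated objective: alternative
-- what changed: Replaces the single-pass four-state machine with a precomputed boolean wall mask and three sequential index searches (first wall, first eye after it, first wall after that), returning end-beg only when a closing wall exists.
import Mathlib
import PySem

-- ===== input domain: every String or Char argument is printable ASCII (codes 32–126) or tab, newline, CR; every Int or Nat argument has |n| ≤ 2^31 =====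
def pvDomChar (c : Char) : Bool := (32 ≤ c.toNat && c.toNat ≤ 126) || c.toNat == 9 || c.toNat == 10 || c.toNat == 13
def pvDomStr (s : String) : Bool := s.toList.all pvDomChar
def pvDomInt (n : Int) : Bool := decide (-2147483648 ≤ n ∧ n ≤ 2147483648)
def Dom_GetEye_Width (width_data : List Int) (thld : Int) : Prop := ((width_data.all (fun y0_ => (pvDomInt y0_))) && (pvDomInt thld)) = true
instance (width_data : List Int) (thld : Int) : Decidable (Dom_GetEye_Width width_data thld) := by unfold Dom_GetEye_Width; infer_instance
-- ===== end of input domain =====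

-- B replaces A's single-pass four-state machine by a wall mask plus three sequential
-- index searches; same O(n) cost, proved equal on non-empty input (both raise on []).

-- ===== PORT A =====
inductive EyeState where
  | PREV_EYE | WALL | CURR_EYE | END
deriving DecidableEq, Repr

-- loop body of A's for-loop, named so the lemmas can speak about it
def stepA (thld : Int) (acc : EyeState × Int × Int) (p : Int × Int) : EyeState × Int × Int :=
  match acc, p with
  | (st, pb, pe), (i, data) =>
    match st with
    | .PREV_EYE => if thld < data then (.WALL, pb, pe) else (.PREV_EYE, pb, pe)
    | .WALL => if data ≤ thld then (.CURR_EYE, i, pe) else (.WALL, pb, pe)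
    | .CURR_EYE => if thld < data then (.END, pb, i) else (.CURR_EYE, pb, pe)
    | .END => (.END, pb, pe)

def GetEye_Width (width_data : List Int) (thld : Int) : Int :=
  match PySem.List.pyGet? width_data 0 with
  | none => 0  -- Python raises IndexError here (width_data[0]); excluded by Pre_
  | some d0 =>
    let st0 : EyeState := if d0 ≤ thld then .PREV_EYE else .WALL
    let r := (PySem.List.enumerate width_data).foldl (stepA thld) (st0, 0, 0)
    max 0 (r.2.2 - r.2.1)

-- ===== PORT B =====
-- hand port of Python's list.index(x, start) for 0 ≤ start: first position ≥ start
-- holding x (none = ValueError); exact for the non-negative starts B uses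
def pyIndexFromAux (l : List Bool) (x : Bool) (start : Nat) (i : Nat) : Option Nat :=
  match l with
  | [] => none
  | b :: bs => if start ≤ i ∧ b = x then some i else pyIndexFromAux bs x start (i + 1)

def pyIndexFrom (l : List Bool) (x : Bool) (start : Nat) : Option Nat :=
  pyIndexFromAux l x start 0

def GetEye_Width_alt (width_data : List Int) (thld : Int) : Int :=
  let walls := width_data.map (fun d => decide (thld < d))
  match walls.head? with
  | none => 0  -- Python raises IndexError here (walls[0]); excluded by Pre_
  | some h =>
    match (if h then some 0 else pyIndexFrom walls true 0) with
    | none => 0  -- ValueError caught: return 0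
    | some w =>
      match pyIndexFrom walls false w with
      | none => 0
      | some beg =>
        match pyIndexFrom walls true beg with
        | none => 0
        | some e => (e : Int) - (beg : Int)

-- ===== PRECONDITION & SPEC =====
-- Pre_ excludes only the empty list, on which A raises IndexError (width_data[0]).
def Pre_GetEye_Width (width_data : List Int) (thld : Int) : Prop := width_data ≠ []
instance (width_data : List Int) (thld : Int) : Decidable (Pre_GetEye_Width width_data thld) := by unfold Pre_GetEye_Width; infer_instance

def pvWitness_GetEye_Width : List Int × Int := ([1, -1, 1], 0)

def Spec_GetEye_Width (width_data : List Int) (thld : Int) (out : Int) : Prop := out = GetEye_Width_alt width_data thld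
instance (width_data : List Int) (thld : Int) (out : Int) : Decidable (Spec_GetEye_Width width_data thld out) := by unfold Spec_GetEye_Width; infer_instance

-- ===== CLAIM (what is proved, stated in full; the proofs are below) =====
def Claim_equal_GetEye_Width : Prop := ∀ (width_data : List Int) (thld : Int), Dom_GetEye_Width width_data thld → Pre_GetEye_Width width_data thld → Spec_GetEye_Width width_data thld (GetEye_Width width_data thld)

-- ===== LEMMAS AND PROOFS =====

-- phase-form specification, common middle ground of both ports
def bCurr (thld : Int) : List Int → Int → Int → Int
  | [], _, _ => 0
  | d :: ds, i, beg => if thld < d then i - beg else bCurr thld ds (i + 1) beg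

def bWall (thld : Int) : List Int → Int → Int
  | [], _ => 0
  | d :: ds, i => if thld < d then bWall thld ds (i + 1) else bCurr thld ds (i + 1) i

def bPrev (thld : Int) : List Int → Int → Int
  | [], _ => 0
  | d :: ds, i => if thld < d then bWall thld ds (i + 1) else bPrev thld ds (i + 1)

def res (t : EyeState × Int × Int) : Int := max 0 (t.2.2 - t.2.1)

-- first index ≥ i (counting from i along wd) whose wall-bit equals x
def ffind (thld : Int) (x : Bool) : List Int → Nat → Option Nat
  | [], _ => none
  | d :: ds, i => if decide (thld < d) = x then some i else ffind thld x ds (i + 1)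

theorem foldl_stepA_end (thld : Int) (l : List (Int × Int)) (pb pe : Int) :
    l.foldl (stepA thld) (.END, pb, pe) = (.END, pb, pe) := by
  induction l with
  | nil => rfl
  | cons p l ih => simpa [stepA] using ih

theorem A_curr (thld : Int) (ds : List Int) : ∀ (s beg : Int), 0 ≤ beg → beg < s →
    res ((PySem.List.enumerate ds s).foldl (stepA thld) (.CURR_EYE, beg, 0)) = bCurr thld ds s beg := by
  induction ds with
  | nil => intro s beg h0 h1; simp [PySem.List.enumerate_nil, res, bCurr]; omega
  | cons d ds ih =>
    intro s beg h0 h1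
    rw [PySem.List.enumerate_cons]
    by_cases h : thld < d
    · simp [stepA, h, foldl_stepA_end, res, bCurr]; omega
    · simp only [List.foldl_cons, stepA, bCurr, if_neg h]
      exact ih (s + 1) beg h0 (by omega)

theorem A_wall (thld : Int) (ds : List Int) : ∀ (s pb : Int), 0 ≤ pb → 0 ≤ s →
    res ((PySem.List.enumerate ds s).foldl (stepA thld) (.WALL, pb, 0)) = bWall thld ds s := by
  induction ds with
  | nil => intro s pb h0 h1; simp [PySem.List.enumerate_nil, res, bWall]; omega
  | cons d ds ih =>
    intro s pb h0 h1
    rw [PySem.List.enumerate_cons]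
    by_cases h : thld < d
    · simp only [List.foldl_cons, stepA, if_neg (by omega : ¬ d ≤ thld), bWall, if_pos h]
      exact ih (s + 1) pb h0 (by omega)
    · simp only [List.foldl_cons, stepA, if_pos (by omega : d ≤ thld), bWall, if_neg h]
      exact A_curr thld ds (s + 1) s (by omega) (by omega)

theorem A_prev (thld : Int) (ds : List Int) : ∀ (s : Int), 0 ≤ s →
    res ((PySem.List.enumerate ds s).foldl (stepA thld) (.PREV_EYE, 0, 0)) = bPrev thld ds s := by
  induction ds with
  | nil => intro s h1; simp [PySem.List.enumerate_nil, res, bPrev]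
  | cons d ds ih =>
    intro s h1
    rw [PySem.List.enumerate_cons]
    by_cases h : thld < d
    · simp only [List.foldl_cons, stepA, bPrev, if_pos h]
      exact A_wall thld ds (s + 1) 0 le_rfl (by omega)
    · simp only [List.foldl_cons, stepA, bPrev, if_neg h]
      exact ih (s + 1) (by omega)

-- B-side: pyIndexFromAux in terms of ffind
theorem ifa_ge (thld : Int) (x : Bool) (wd : List Int) : ∀ (s i : Nat), s ≤ i →
    pyIndexFromAux (wd.map (fun d => decide (thld < d))) x s i = ffind thld x wd i := by
  induction wd with
  | nil => intro s i h; rfl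
  | cons d ds ih =>
    intro s i h
    by_cases hx : decide (thld < d) = x
    · simp [pyIndexFromAux, ffind, hx, h]
    · simp only [List.map_cons, pyIndexFromAux, ffind, if_neg hx,
        if_neg (by simp [hx] : ¬ (s ≤ i ∧ decide (thld < d) = x))]
      exact ih s (i + 1) (by omega)

theorem ifa_lt (thld : Int) (x : Bool) (wd : List Int) : ∀ (s i : Nat), i ≤ s →
    pyIndexFromAux (wd.map (fun d => decide (thld < d))) x s i = ffind thld x (wd.drop (s - i)) s := by
  induction wd with
  | nil => intro s i h; simp [pyIndexFromAux, ffind]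
  | cons d ds ih =>
    intro s i h
    rcases Nat.lt_or_ge i s with hlt | hge
    · simp only [List.map_cons, pyIndexFromAux,
        if_neg (by omega : ¬ (s ≤ i ∧ decide (thld < d) = x))]
      rw [ih s (i + 1) (by omega)]
      have : (d :: ds).drop (s - i) = ds.drop (s - (i + 1)) := by
        have h1 : s - i = (s - (i + 1)) + 1 := by omega
        simp [h1]
      rw [this]
    · have hsi : i = s := by omega
      subst hsi
      by_cases hx : decide (thld < d) = x
      · simp [pyIndexFromAux, ffind, hx]
      · simp only [List.map_cons, pyIndexFromAux, ffind, Nat.sub_self, List.drop_zero,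
          if_neg (by simp [hx] : ¬ (i ≤ i ∧ decide (thld < d) = x)), if_neg hx]
        exact ifa_ge thld x ds i (i + 1) (by omega)

theorem ffind_ge (thld : Int) (x : Bool) (wd : List Int) : ∀ (i j : Nat),
    ffind thld x wd i = some j → i ≤ j := by
  induction wd with
  | nil => intro i j h; simp [ffind] at h
  | cons d ds ih =>
    intro i j h
    by_cases hx : decide (thld < d) = x
    · simp [ffind, hx] at h; omega
    · simp only [ffind, if_neg hx] at h
      have := ih (i + 1) j h; omega

theorem ffind_drop (thld : Int) (x : Bool) (wd : List Int) : ∀ (i j : Nat),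
    ffind thld x wd i = some j →
    ∃ d, wd.drop (j - i) = d :: wd.drop (j - i + 1) ∧ decide (thld < d) = x := by
  induction wd with
  | nil => intro i j h; simp [ffind] at h
  | cons d ds ih =>
    intro i j h
    by_cases hx : decide (thld < d) = x
    · simp [ffind, hx] at h
      subst h
      exact ⟨d, by simp, hx⟩
    · simp only [ffind, if_neg hx] at h
      have hge := ffind_ge thld x ds (i + 1) j h
      obtain ⟨e, he, hex⟩ := ih (i + 1) j h
      refine ⟨e, ?_, hex⟩
      have h1 : j - i = (j - (i + 1)) + 1 := by omega
      simp [h1, he]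

theorem ffind_skip (thld : Int) (x : Bool) (d : Int) (rest : List Int) (i : Nat)
    (hx : decide (thld < d) ≠ x) : ffind thld x (d :: rest) i = ffind thld x rest (i + 1) := by
  simp [ffind, hx]

-- phase functions in first-index form
theorem C_form (thld : Int) (ds : List Int) : ∀ (i beg : Nat),
    bCurr thld ds (i : Int) (beg : Int) =
      match ffind thld true ds i with
      | none => 0
      | some e => (e : Int) - (beg : Int) := by
  induction ds with
  | nil => intro i beg; simp [bCurr, ffind]
  | cons d dt ih =>
    intro i beg
    by_cases h : thld < d
    · simp [bCurr, ffind, h]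
    · have hd : decide (thld < d) = false := by simp [h]
      have hih := ih (i + 1) beg
      push_cast at hih
      simp only [bCurr, if_neg h, ffind, hd, Bool.false_eq_true, if_neg (by simp : ¬ False)]
      rw [hih]

theorem W_form (thld : Int) (wd : List Int) : ∀ (i : Nat),
    bWall thld wd (i : Int) =
      match ffind thld false wd i with
      | none => 0
      | some beg =>
        match ffind thld true (wd.drop (beg + 1 - i)) (beg + 1) with
        | none => 0
        | some e => (e : Int) - (beg : Int) := by
  induction wd with
  | nil => intro i; simp [bWall, ffind]
  | cons d ds ih =>
    intro i
    by_cases h : thld < d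
    · have hd : decide (thld < d) = true := by simp [h]
      simp only [bWall, if_pos h, ffind, hd, Bool.true_eq_false, if_neg (by simp : ¬ False)]
      have hih := ih (i + 1)
      push_cast at hih ⊢
      rw [hih]
      rcases hE : ffind thld false ds (i + 1) with _ | beg
      · rfl
      · simp only []
        have hge := ffind_ge thld false ds (i + 1) beg hE
        have h1 : (d :: ds).drop (beg + 1 - i) = ds.drop (beg + 1 - (i + 1)) := by
          have h2 : beg + 1 - i = (beg + 1 - (i + 1)) + 1 := by omega
          simp [h2]
        rw [h1]
        have h3 : beg + 1 - (i + 1) = beg - i := by omega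
        rw [h3]
    · have hd : decide (thld < d) = false := by simp [h]
      simp only [bWall, if_neg h, ffind, hd, if_true]
      have hih := C_form thld ds (i + 1) i
      push_cast at hih ⊢
      rw [hih]
      have h1 : (d :: ds).drop (i + 1 - i) = ds := by
        have h2 : i + 1 - i = 1 := by omega
        simp [h2]
      rw [h1]

theorem P_form (thld : Int) (wd : List Int) : ∀ (i : Nat),
    bPrev thld wd (i : Int) =
      match ffind thld true wd i with
      | none => 0
      | some w => bWall thld (wd.drop (w + 1 - i)) ((w : Int) + 1) := by
  induction wd with
  | nil => intro i; simp [bPrev, ffind]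
  | cons d ds ih =>
    intro i
    by_cases h : thld < d
    · have hd : decide (thld < d) = true := by simp [h]
      simp only [bPrev, if_pos h, ffind, hd, if_true]
      have h1 : (d :: ds).drop (i + 1 - i) = ds := by
        have h2 : i + 1 - i = 1 := by omega
        simp [h2]
      rw [h1]
    · have hd : decide (thld < d) = false := by simp [h]
      simp only [bPrev, if_neg h, ffind, hd, Bool.false_eq_true, if_neg (by simp : ¬ False)]
      have hih := ih (i + 1)
      push_cast at hih ⊢
      rw [hih]
      rcases hE : ffind thld true ds (i + 1) with _ | w
      · rfl
      · simp only []
        have hge := ffind_ge thld true ds (i + 1) w hE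
        have h1 : (d :: ds).drop (w + 1 - i) = ds.drop (w + 1 - (i + 1)) := by
          have h2 : w + 1 - i = (w + 1 - (i + 1)) + 1 := by omega
          simp [h2]
        rw [h1]
        have h3 : w + 1 - (i + 1) = w - i := by omega
        rw [h3]

-- ===== VERDICT (by name: the statement is the Claim_ definition above) =====
theorem GetEye_Width_spec : Claim_equal_GetEye_Width := by
  intro wd thld _hdom hpre
  unfold Spec_GetEye_Width
  match wd with
  | [] => exact absurd rfl hpre
  | d0 :: ds =>
    unfold GetEye_Width GetEye_Width_alt pyIndexFrom
    have hget : PySem.List.pyGet? (d0 :: ds) 0 = some d0 := by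
      simp [PySem.List.pyGet?, PySem.List.pyIdx?]
    rw [hget]
    simp only [List.map_cons, List.head?_cons]
    by_cases hc : d0 ≤ thld
    · -- state0 = PREV_EYE; walls[0] = false
      have hd0 : decide (thld < d0) = false := by simp; omega
      simp only [if_pos hc, hd0, Bool.false_eq_true, if_neg (by simp : ¬ False)]
      have hA := A_prev thld (d0 :: ds) 0 le_rfl
      simp only [res] at hA
      rw [hA]
      have hP := P_form thld (d0 :: ds) 0
      push_cast at hP
      rw [hP]
      have hW : pyIndexFromAux (false :: ds.map (fun d => decide (thld < d))) true 0 0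
          = ffind thld true (d0 :: ds) 0 := by
        have h1 := ifa_ge thld true (d0 :: ds) 0 0 le_rfl
        simp only [List.map_cons, hd0] at h1
        exact h1
      rw [hW]
      rcases hw : ffind thld true (d0 :: ds) 0 with _ | w
      · rfl
      · simp only []
        have hWf := W_form thld ((d0 :: ds).drop (w + 1)) (w + 1)
        push_cast at hWf
        rw [hWf]
        obtain ⟨dw, hdw, hdwx⟩ := ffind_drop thld true (d0 :: ds) 0 w hw
        simp only [Nat.sub_zero] at hdw
        have hB : pyIndexFromAux (false :: ds.map (fun d => decide (thld < d))) false w 0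
            = ffind thld false ((d0 :: ds).drop (w + 1)) (w + 1) := by
          have h1 := ifa_lt thld false (d0 :: ds) w 0 (by omega)
          simp only [List.map_cons, hd0, Nat.sub_zero, hdw] at h1
          rw [h1, ffind_skip thld false dw ((d0 :: ds).drop (w + 1)) w (by simp [hdwx])]
        rw [hB]
        rcases hbeg : ffind thld false ((d0 :: ds).drop (w + 1)) (w + 1) with _ | beg
        · rfl
        · simp only []
          have hgeb := ffind_ge thld false ((d0 :: ds).drop (w + 1)) (w + 1) beg hbeg
          obtain ⟨db, hdb, hdbx⟩ := ffind_drop thld false ((d0 :: ds).drop (w + 1)) (w + 1) beg hbeg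
          rw [List.drop_drop, List.drop_drop] at hdb
          rw [show w + 1 + (beg - (w + 1)) = beg by omega,
              show w + 1 + (beg - (w + 1) + 1) = beg + 1 by omega] at hdb
          have hB2 : pyIndexFromAux (false :: ds.map (fun d => decide (thld < d))) true beg 0
              = ffind thld true ((d0 :: ds).drop (beg + 1)) (beg + 1) := by
            have h1 := ifa_lt thld true (d0 :: ds) beg 0 (by omega)
            simp only [List.map_cons, hd0, Nat.sub_zero, hdb] at h1
            rw [h1, ffind_skip thld true db ((d0 :: ds).drop (beg + 1)) beg (by simp [hdbx])]
          rw [hB2]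
          rw [List.drop_drop, show w + 1 + (beg - w) = beg + 1 by omega]
    · -- state0 = WALL; walls[0] = true
      have hd0 : decide (thld < d0) = true := by simp; omega
      simp only [if_neg hc, hd0, if_true]
      have hA := A_wall thld (d0 :: ds) 0 0 le_rfl le_rfl
      simp only [res] at hA
      rw [hA]
      have hWf := W_form thld (d0 :: ds) 0
      push_cast at hWf
      rw [hWf]
      have hB : pyIndexFromAux (true :: ds.map (fun d => decide (thld < d))) false 0 0
          = ffind thld false (d0 :: ds) 0 := by
        have h1 := ifa_ge thld false (d0 :: ds) 0 0 le_rfl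
        simp only [List.map_cons, hd0] at h1
        exact h1
      rw [hB]
      rcases hbeg : ffind thld false (d0 :: ds) 0 with _ | beg
      · rfl
      · simp only []
        obtain ⟨db, hdb, hdbx⟩ := ffind_drop thld false (d0 :: ds) 0 beg hbeg
        simp only [Nat.sub_zero] at hdb
        have hB2 : pyIndexFromAux (true :: ds.map (fun d => decide (thld < d))) true beg 0
            = ffind thld true ((d0 :: ds).drop (beg + 1)) (beg + 1) := by
          have h1 := ifa_lt thld true (d0 :: ds) beg 0 (by omega)
          simp only [List.map_cons, hd0, Nat.sub_zero, hdb] at h1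
          rw [h1, ffind_skip thld true db ((d0 :: ds).drop (beg + 1)) beg (by simp [hdbx])]
        rw [hB2]
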